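-- pv_equiv track=rewrite | github.com/DonIsmaelito/editr | src_2/editor/video_composer.py | _escape_ffmpeg_drawtext_text
-- ===== SOURCE A (Python) =====
-- def _escape_ffmpeg_drawtext_text(text: str) -> str:
--     """Escape caption text for FFmpeg drawtext."""
--     escaped = text.replace("\\", r"\\")
--     replacements = {
--         ":": r"\:",
--         "'": "\u2019",
--         "%": r"\%",
--         ",": r"\,",
--         ";": r"\;",
--         "[": r"\[",
--         "]": r"\]",
--         "\n": r"\n",
--     }
--     for source, target in replacements.items():
--         escaped = escaped.replace(source, target)
--     return escaped
-- ===== SOURCE B (Python) =====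
-- _FFMPEG_DRAWTEXT_ESCAPES = {
--     "\\": "\\\\",
--     ":": "\\:",
--     "'": "\u2019",
--     "%": "\\%",
--     ",": "\\,",
--     ";": "\\;",
--     "[": "\\[",
--     "]": "\\]",
--     "\n": "\\n",
-- }
--
--
-- def _escape_ffmpeg_drawtext_text(text: str) -> str:
--     """Escape caption text for FFmpeg drawtext (single pass over the characters)."""
--     table = _FFMPEG_DRAWTEXT_ESCAPES
--     return "".join(table.get(ch, ch) for ch in text)
-- ===== Notes on version B (the rewrite author's own statement) =====
-- stated objective: simpler
-- what changed: Replaces A's nine sequential whole-string replace passes with one combined char-to-escape table and a single character-level pass whose pieces are joined into the result; exact because none of A's replacements cascades into a later one.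
import Mathlib
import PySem

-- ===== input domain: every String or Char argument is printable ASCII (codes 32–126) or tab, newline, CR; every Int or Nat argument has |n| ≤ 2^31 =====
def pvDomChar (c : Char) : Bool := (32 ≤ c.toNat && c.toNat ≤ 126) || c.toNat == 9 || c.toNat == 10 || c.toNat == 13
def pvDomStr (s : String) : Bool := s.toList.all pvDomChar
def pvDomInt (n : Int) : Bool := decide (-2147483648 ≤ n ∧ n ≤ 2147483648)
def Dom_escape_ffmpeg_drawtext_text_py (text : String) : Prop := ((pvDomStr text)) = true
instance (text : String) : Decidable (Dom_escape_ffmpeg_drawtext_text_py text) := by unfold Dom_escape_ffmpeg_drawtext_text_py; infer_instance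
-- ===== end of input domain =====

-- B replaces A's nine sequential whole-string replace passes by one combined
-- char→escape table and a single character-level pass (objective: simpler).

-- ===== PORT A =====
def escape_ffmpeg_drawtext_text_py (text : String) : String :=
  let escaped := PySem.Str.replace text "\\" "\\\\"
  let replacements : PySem.Dict String String := PySem.Dict.ofList
    [(":", "\\:"), ("'", "\u2019"), ("%", "\\%"), (",", "\\,"),
     (";", "\\;"), ("[", "\\["), ("]", "\\]"), ("\n", "\\n")]
  replacements.items.foldl (fun esc st => PySem.Str.replace esc st.1 st.2) escaped

-- ===== PORT B =====
-- the module-level table _FFMPEG_DRAWTEXT_ESCAPES of Source B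
def pvEscTable : PySem.Dict Char String :=
  PySem.Dict.ofList
    [('\\', "\\\\"), (':', "\\:"), ('\'', "\u2019"), ('%', "\\%"), (',', "\\,"),
     (';', "\\;"), ('[', "\\["), (']', "\\]"), ('\n', "\\n")]

def escape_ffmpeg_drawtext_text_py_alt (text : String) : String :=
  PySem.Str.join "" (text.toList.map (fun ch => PySem.Dict.getD pvEscTable ch (String.ofList [ch])))

-- ===== PRECONDITION & SPEC =====
def Spec_escape_ffmpeg_drawtext_text_py (text : String) (out : String) : Prop := out = escape_ffmpeg_drawtext_text_py_alt text
instance (text : String) (out : String) : Decidable (Spec_escape_ffmpeg_drawtext_text_py text out) := by unfold Spec_escape_ffmpeg_drawtext_text_py; infer_instance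

-- ===== CLAIM (what is proved, stated in full; the proofs are below) =====
def Claim_equal_escape_ffmpeg_drawtext_text_py : Prop := ∀ (text : String), Dom_escape_ffmpeg_drawtext_text_py text → Spec_escape_ffmpeg_drawtext_text_py text (escape_ffmpeg_drawtext_text_py text)

-- ===== LEMMAS AND PROOFS =====

-- replace with a single-character pattern is a per-character flatMap
theorem pv_go_single (a : Char) (t : List Char) :
    ∀ (cs : List Char) (fuel : Nat) (acc : List Char), cs.length ≤ fuel →
      PySem.Chars.replace.go [a] t fuel cs acc
        = acc.reverse ++ cs.flatMap (fun c => if c = a then t else [c]) := by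
  intro cs
  induction cs with
  | nil =>
      intro fuel acc _
      cases fuel <;> simp [PySem.Chars.replace.go]
  | cons c cs ih =>
      intro fuel acc hle
      cases fuel with
      | zero => simp at hle
      | succ n =>
          by_cases h : c = a
          · subst h
            simp only [PySem.Chars.replace.go, List.isPrefixOf, beq_self_eq_true,
              Bool.true_and, if_true, List.length_cons,
              List.length_nil, Nat.zero_add, List.drop_succ_cons, List.drop_zero]
            rw [ih n (t.reverse ++ acc) (by simpa using hle)]
            simp
          · have hpre : [a].isPrefixOf (c :: cs) = false := by
              simp [List.isPrefixOf]
              intro hh; exact absurd hh.symm h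
            simp only [PySem.Chars.replace.go, hpre, Bool.false_eq_true, if_false]
            rw [ih n (c :: acc) (by simpa using hle)]
            simp [h]

theorem pv_replace_single (cs : List Char) (a : Char) (t : List Char) :
    PySem.Chars.replace cs [a] t = cs.flatMap (fun c => if c = a then t else [c]) := by
  simpa [PySem.Chars.replace] using pv_go_single a t cs cs.length [] le_rfl

theorem pv_join_nil_flatten (l : List (List Char)) :
    PySem.Chars.join [] l = l.flatten := by
  induction l with
  | nil => simp [PySem.Chars.join, List.intercalate]
  | cons x l ih =>
      cases l with
      | nil => simp [PySem.Chars.join, List.intercalate]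
      | cons y l' => simpa [PySem.Chars.join_cons_cons] using congrArg (x ++ ·) ih

-- the composed effect of A's nine passes on one character = B's table lookup
theorem pv_char_eq (c : Char) :
    ((((((((((if c = '\\' then ['\\','\\'] else [c]).flatMap
        (fun c => if c = ':' then ['\\',':'] else [c])).flatMap
        (fun c => if c = '\'' then ['\u2019'] else [c])).flatMap
        (fun c => if c = '%' then ['\\','%'] else [c])).flatMap
        (fun c => if c = ',' then ['\\',','] else [c])).flatMap
        (fun c => if c = ';' then ['\\',';'] else [c])).flatMap
        (fun c => if c = '[' then ['\\','['] else [c])).flatMap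
        (fun c => if c = ']' then ['\\',']'] else [c])).flatMap
        (fun c => if c = '\n' then ['\\','n'] else [c])))
      = (PySem.Dict.getD pvEscTable c (String.ofList [c])).toList := by
  by_cases h1 : c = '\\';  · subst h1; decide
  by_cases h2 : c = ':';   · subst h2; decide
  by_cases h3 : c = '\'';  · subst h3; decide
  by_cases h4 : c = '%';   · subst h4; decide
  by_cases h5 : c = ',';   · subst h5; decide
  by_cases h6 : c = ';';   · subst h6; decide
  by_cases h7 : c = '[';   · subst h7; decide
  by_cases h8 : c = ']';   · subst h8; decide
  by_cases h9 : c = '\n';  · subst h9; decide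
  have g1 := Ne.symm h1; have g2 := Ne.symm h2; have g3 := Ne.symm h3
  have g4 := Ne.symm h4; have g5 := Ne.symm h5; have g6 := Ne.symm h6
  have g7 := Ne.symm h7; have g8 := Ne.symm h8; have g9 := Ne.symm h9
  have hmk : pvEscTable = PySem.Dict.mk
      [('\\', "\\\\"), (':', "\\:"), ('\'', "\u2019"), ('%', "\\%"), (',', "\\,"),
       (';', "\\;"), ('[', "\\["), (']', "\\]"), ('\n', "\\n")] := by rfl
  simp [hmk, PySem.Dict.getD, PySem.Dict.get?, beq_iff_eq,
    h1, h2, h3, h4, h5, h6, h7, h8, h9, g1, g2, g3, g4, g5, g6, g7, g8, g9]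

-- A's nine passes over the whole string collapse to one pass with the combined table
theorem pv_chain (cs : List Char) :
    List.flatMap (fun c => if c = '\n' then ['\\','n'] else [c])
      (List.flatMap (fun c => if c = ']' then ['\\',']'] else [c])
        (List.flatMap (fun c => if c = '[' then ['\\','['] else [c])
          (List.flatMap (fun c => if c = ';' then ['\\',';'] else [c])
            (List.flatMap (fun c => if c = ',' then ['\\',','] else [c])
              (List.flatMap (fun c => if c = '%' then ['\\','%'] else [c])
                (List.flatMap (fun c => if c = '\'' then ['\u2019'] else [c])
                  (List.flatMap (fun c => if c = ':' then ['\\',':'] else [c])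
                    (List.flatMap (fun c => if c = '\\' then ['\\','\\'] else [c]) cs))))))))
      = cs.flatMap (fun x => (PySem.Dict.getD pvEscTable x (String.ofList [x])).toList) := by
  induction cs with
  | nil => rfl
  | cons c cs ih =>
      simp only [List.flatMap_cons, List.flatMap_append]
      rw [ih, pv_char_eq c]

-- ===== VERDICT (by name: the statement is the Claim_ definition above) =====
theorem escape_ffmpeg_drawtext_text_py_spec : Claim_equal_escape_ffmpeg_drawtext_text_py := by
  intro text _
  unfold Spec_escape_ffmpeg_drawtext_text_py
  have hA : escape_ffmpeg_drawtext_text_py text =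
      PySem.Str.replace (PySem.Str.replace (PySem.Str.replace (PySem.Str.replace
        (PySem.Str.replace (PySem.Str.replace (PySem.Str.replace (PySem.Str.replace
          (PySem.Str.replace text "\\" "\\\\") ":" "\\:") "'" "\u2019") "%" "\\%")
            "," "\\,") ";" "\\;") "[" "\\[") "]" "\\]") "\n" "\\n" := rfl
  rw [hA]
  apply String.toList_inj.mp
  simp only [PySem.Str.toList_replace, PySem.Str.toList_join,
    escape_ffmpeg_drawtext_text_py_alt]
  have e0 : ("" : String).toList = [] := rfl
  have e1 : ("\\" : String).toList = ['\\'] := rfl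
  have e2 : ("\\\\" : String).toList = ['\\','\\'] := rfl
  have e3 : (":" : String).toList = [':'] := rfl
  have e4 : ("\\:" : String).toList = ['\\',':'] := rfl
  have e5 : ("'" : String).toList = ['\''] := rfl
  have e6 : ("\u2019" : String).toList = ['\u2019'] := rfl
  have e7 : ("%" : String).toList = ['%'] := rfl
  have e8 : ("\\%" : String).toList = ['\\','%'] := rfl
  have e9 : ("," : String).toList = [','] := rfl
  have e10 : ("\\," : String).toList = ['\\',','] := rfl
  have e11 : (";" : String).toList = [';'] := rfl
  have e12 : ("\\;" : String).toList = ['\\',';'] := rfl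
  have e13 : ("[" : String).toList = ['['] := rfl
  have e14 : ("\\[" : String).toList = ['\\','['] := rfl
  have e15 : ("]" : String).toList = [']'] := rfl
  have e16 : ("\\]" : String).toList = ['\\',']'] := rfl
  have e17 : ("\n" : String).toList = ['\n'] := rfl
  have e18 : ("\\n" : String).toList = ['\\','n'] := rfl
  rw [e0, e1, e2, e3, e4, e5, e6, e7, e8, e9, e10, e11, e12, e13, e14, e15, e16, e17, e18]
  simp only [pv_replace_single, pv_join_nil_flatten, List.map_map]
  rw [← List.flatMap_def]
  exact pv_chain text.toList
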